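-- pv_equiv track=rewrite | github.com/KaplanHalil/BlockCipherTestTool | AvalCorrTests/corr_p_rc.py | convert_2d_list
-- ===== SOURCE A (Python) =====
-- def convert_2d_list(input_list):
--     def convert_value(value):
--         if 0 <= value < 300:
--             return 0
--         elif 300 <= value < 350:
--             return 50
--         elif 350 <= value < 400:
--             return 100
--         elif 400 <= value < 450:
--             return 150
--         elif 450 <= value < 550:
--             return 255
--         elif 550 <= value < 600:
--             return 210
--         elif 600 <= value < 700:
--             return 150
--         elif 700 <= value < 800:
--             return 100
--         elif 800 <= value < 900:
--             return 50
--         elif 900 <= value <= 1000: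
--             return 0
--         else:
--             raise ValueError(f"Value {value} is out of range 0-1000.")
--
--     return [convert_value(value) for row in input_list for value in row]
-- ===== SOURCE B (Python) =====
-- _BOUNDS = [300, 350, 400, 450, 550, 600, 700, 800, 900]
-- _OUTPUTS = [0, 50, 100, 150, 255, 210, 150, 100, 50, 0]
--
--
-- def _convert_value(value):
--     if not (0 <= value <= 1000):
--         raise ValueError(f"Value {value} is out of range 0-1000.")
--     lo, hi = 0, len(_BOUNDS)
--     while lo < hi:
--         mid = (lo + hi) // 2
--         if value < _BOUNDS[mid]:
--             hi = mid
--         else: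
--             lo = mid + 1
--     return _OUTPUTS[lo]
--
--
-- def convert_2d_list(input_list):
--     return [_convert_value(value) for row in input_list for value in row]
-- ===== Notes on version B (the rewrite author's own statement) =====
-- stated objective: alternative
-- what changed: The per-element ten-branch comparison cascade is replaced by a sorted boundary table plus a hand-written binary search into a parallel outputs table; the flatten comprehension is kept.
import Mathlib
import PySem

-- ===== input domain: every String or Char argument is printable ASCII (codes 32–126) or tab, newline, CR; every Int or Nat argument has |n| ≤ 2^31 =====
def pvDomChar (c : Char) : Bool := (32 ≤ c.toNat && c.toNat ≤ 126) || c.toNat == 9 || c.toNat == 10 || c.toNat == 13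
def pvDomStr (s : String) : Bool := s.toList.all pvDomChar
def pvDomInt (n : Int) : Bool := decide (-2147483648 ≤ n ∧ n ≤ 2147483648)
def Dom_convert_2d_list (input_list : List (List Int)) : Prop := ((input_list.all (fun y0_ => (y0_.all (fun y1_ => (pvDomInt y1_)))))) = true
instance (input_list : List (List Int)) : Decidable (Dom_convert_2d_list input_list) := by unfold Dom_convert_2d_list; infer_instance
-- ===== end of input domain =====

-- B replaces A's ten-branch comparison cascade by a boundary table with a hand-written
-- binary search (simpler per-element mechanism); the flatten comprehension is kept.


-- ===== PORT A =====
-- convert_value: the ten-branch cascade; the final 'raise ValueError' is 'none'.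
def pvConvertValue (value : Int) : Option Int :=
  if 0 ≤ value ∧ value < 300 then some 0
  else if 300 ≤ value ∧ value < 350 then some 50
  else if 350 ≤ value ∧ value < 400 then some 100
  else if 400 ≤ value ∧ value < 450 then some 150
  else if 450 ≤ value ∧ value < 550 then some 255
  else if 550 ≤ value ∧ value < 600 then some 210
  else if 600 ≤ value ∧ value < 700 then some 150
  else if 700 ≤ value ∧ value < 800 then some 100
  else if 800 ≤ value ∧ value < 900 then some 50
  else if 900 ≤ value ∧ value ≤ 1000 then some 0
  else none

-- the comprehension [convert_value(v) for row in input_list for v in row];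
-- a raise (none) is unreachable inside Pre_, outside it we return [] (unclaimed).
def convert_2d_list (input_list : List (List Int)) : List Int :=
  ((input_list.flatMap (fun row => row)).mapM pvConvertValue).getD []

-- ===== PORT B =====
def pvBounds : List Int := [300, 350, 400, 450, 550, 600, 700, 800, 900]
def pvOutputs : List Int := [0, 50, 100, 150, 255, 210, 150, 100, 50, 0]

-- the while-loop binary search of Source B (lo, hi are the loop state)
def pvBisect (x : Int) (lo hi : Nat) : Nat :=
  if _h : lo < hi then
    let mid := (lo + hi) / 2
    if x < pvBounds.getD mid 0 then pvBisect x lo mid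
    else pvBisect x (mid + 1) hi
  else lo
termination_by hi - lo
decreasing_by all_goals omega

-- _convert_value of Source B: guard, binary search, table lookup; the raise is 'none'.
def pvConvertValueAlt (value : Int) : Option Int :=
  if 0 ≤ value ∧ value ≤ 1000 then
    some (pvOutputs.getD (pvBisect value 0 pvBounds.length) 0)
  else none

def convert_2d_list_alt (input_list : List (List Int)) : List Int :=
  ((input_list.flatMap (fun row => row)).mapM pvConvertValueAlt).getD []

-- ===== PRECONDITION & SPEC =====
-- Pre_: every value lies in [0, 1000]; on any other value A raises ValueError.
def Pre_convert_2d_list (input_list : List (List Int)) : Prop :=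
  ∀ row ∈ input_list, ∀ v ∈ row, 0 ≤ v ∧ v ≤ 1000
instance (input_list : List (List Int)) : Decidable (Pre_convert_2d_list input_list) := by
  unfold Pre_convert_2d_list; infer_instance

def pvWitness_convert_2d_list : List (List Int) := [[0, 299, 300], [1000, 555]]

def Spec_convert_2d_list (input_list : List (List Int)) (out : List Int) : Prop := out = convert_2d_list_alt input_list
instance (input_list : List (List Int)) (out : List Int) : Decidable (Spec_convert_2d_list input_list out) := by unfold Spec_convert_2d_list; infer_instance

-- ===== CLAIM (what is proved, stated in full; the proofs are below) =====
def Claim_equal_convert_2d_list : Prop := ∀ (input_list : List (List Int)), Dom_convert_2d_list input_list → Pre_convert_2d_list input_list → Spec_convert_2d_list input_list (convert_2d_list input_list)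

-- ===== LEMMAS AND PROOFS =====

-- the two per-value functions agree on [0, 1000]
-- evaluating the binary search on the fixed 9-element boundary table
set_option maxRecDepth 4000 in
theorem pvBisect_eval (v : Int) : pvBisect v 0 9 =
    if v < 550 then
      if v < 400 then
        if v < 350 then (if v < 300 then 0 else 1) else 2
      else if v < 450 then 3 else 4
    else if v < 800 then
      if v < 700 then (if v < 600 then 5 else 6) else 7
    else if v < 900 then 8 else 9 := by
  simp [pvBisect, pvBounds]

-- the two per-value functions agree on [0, 1000]
set_option maxHeartbeats 1600000 in
theorem pvConvertValue_eq_alt (v : Int) (h0 : 0 ≤ v) (h1 : v ≤ 1000) :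
    pvConvertValue v = pvConvertValueAlt v := by
  unfold pvConvertValue pvConvertValueAlt
  have hb : pvBounds.length = 9 := by decide
  rw [hb, pvBisect_eval]
  split_ifs <;> first | rfl | omega

theorem mapM_congr_of_mem {α β : Type} (f g : α → Option β) (l : List α)
    (h : ∀ x ∈ l, f x = g x) : l.mapM f = l.mapM g := by
  induction l with
  | nil => rfl
  | cons a t ih =>
      simp only [List.mapM_cons, h a (List.mem_cons_self), ih (fun x hx => h x (List.mem_cons_of_mem a hx))]

theorem convert_2d_list_spec : Claim_equal_convert_2d_list := by
  intro input_list _ hpre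
  unfold Spec_convert_2d_list convert_2d_list convert_2d_list_alt
  congr 1
  apply mapM_congr_of_mem
  intro v hv
  rw [List.mem_flatMap] at hv
  obtain ⟨row, hrow, hvrow⟩ := hv
  obtain ⟨h0, h1⟩ := hpre row hrow v hvrow
  exact pvConvertValue_eq_alt v h0 h1
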